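-- pv_equiv track=rewrite | github.com/sonar-solutions/sonar-reports | src/dependencies.py | plan_dependency_values
-- ===== SOURCE A (Python) =====
-- from collections import defaultdict
--
-- def find_required_keys(task, field):
--     required_keys = defaultdict(set)
--     if isinstance(field, dict):
--         for k, v in field.items():
--             if isinstance(v, dict):
--                 sub_keys = find_required_keys(field=v, task=task)
--                 for sub_key, keys in sub_keys.items():
--                     required_keys[sub_key] = required_keys[sub_key].union(keys)
--             elif k == 'path':
--                 if 'source' in field.keys():
--                     required_keys[field['source']].add(v.replace('$.', '').split('.')[0])
--                 else:
--                     required_keys[task].add(v.replace('$.', '').split('.')[0])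
--     elif isinstance(field, list):
--         for i in field:
--             sub_keys = find_required_keys(field=i, task=task)
--             for sub_key, keys in sub_keys.items():
--                 required_keys[sub_key] = required_keys[sub_key].union(keys)
--     return required_keys
--
-- def plan_dependency_values(config, task):
--     field_keys = ['operations', 'prefilters', 'parameters', 'body', 'json']
--     required_keys = defaultdict(set)
--     for key in field_keys:
--         if key in config.keys():
--             requirements = find_required_keys(task=task, field=config[key])
--             for k, v in requirements.items():
--                 required_keys[k] = required_keys[k].union(v)
--     return required_keys
-- ===== SOURCE B (Python) =====
-- from collections import defaultdict
--
-- def plan_dependency_values(config, task):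
--     # Flat two-level loop instead of A's general recursion: at this input type
--     # (dict[str, list[dict[str, str]]]) each config[key] is a list of flat dicts,
--     # so the recursion only ever sees one list level and one dict level.
--     required_keys = defaultdict(set)
--     for key in ('operations', 'prefilters', 'parameters', 'body', 'json'):
--         for entry in config.get(key, []):
--             path = entry.get('path')
--             if path is not None:
--                 target = entry.get('source', task)
--                 required_keys[target].add(path.replace('$.', '').split('.')[0])
--     return required_keys
-- ===== Notes on version B (the rewrite author's own statement) =====
-- stated objective: simpler
-- what changed: Replaced A's general mutual recursion over arbitrarily nested dicts/lists (building a per-subtree defaultdict and merging it upward with set unions at every level) by a flat two-level loop over the five field keys and their entry dicts that adds each processed path value directly into one shared defaultdict(set); at the declared input type dict[str, list[dict[str, str]]] the nesting is fixed, so no recursion and no merge step is needed.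
import Mathlib
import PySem

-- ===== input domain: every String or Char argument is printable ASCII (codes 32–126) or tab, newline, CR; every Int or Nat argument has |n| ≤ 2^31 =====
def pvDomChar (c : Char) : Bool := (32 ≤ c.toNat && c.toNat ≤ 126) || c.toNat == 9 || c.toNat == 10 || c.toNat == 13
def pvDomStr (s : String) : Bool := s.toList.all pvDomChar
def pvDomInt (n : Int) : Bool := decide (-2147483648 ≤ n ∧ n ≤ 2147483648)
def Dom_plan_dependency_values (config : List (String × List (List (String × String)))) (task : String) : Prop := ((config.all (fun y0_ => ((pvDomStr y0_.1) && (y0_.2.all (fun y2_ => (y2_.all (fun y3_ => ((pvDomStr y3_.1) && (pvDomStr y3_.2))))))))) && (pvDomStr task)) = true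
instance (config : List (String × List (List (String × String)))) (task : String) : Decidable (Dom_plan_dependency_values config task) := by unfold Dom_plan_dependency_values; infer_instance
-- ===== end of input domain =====

-- B is a flat two-level loop over the five field keys and the entry dicts, threading one
-- accumulator, instead of A's general recursion with per-subtree result dicts merged upward;
-- objective: simpler (at this input type the nesting depth is fixed, so no recursion is needed).

-- v.replace('$.', '').split('.')[0] — identical expression in both Pythons; split on the
-- non-empty separator "." never returns an empty list, so [0] is the head (headD unreachable default)
def pvPathHead (v : String) : String :=
  ((PySem.Str.split? (PySem.Str.replace v "$." "") ".").getD []).headD ""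

-- ===== PORT A =====
-- find_required_keys(task, field) for a dict field. At the input type the values of the dict are
-- strings, so the `isinstance(v, dict)` branch never fires and only the `k == 'path'` branch remains.
-- `required_keys[T].add(x)` on a defaultdict(set) is `modify T Set.empty (Set.add · x)`.
def find_required_keys_dict (task : String) (field : PySem.Dict String String) : PySem.Dict String (PySem.Set String) :=
  field.items.foldl (fun req kv =>
    if kv.1 == "path" then
      if field.contains "source" then
        req.modify (field.getD "source" "") PySem.Set.empty (fun s => PySem.Set.add s (pvPathHead kv.2))
      else
        req.modify task PySem.Set.empty (fun s => PySem.Set.add s (pvPathHead kv.2))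
    else req) PySem.Dict.empty

-- find_required_keys(task, field) for a list field: recurse into each element (a dict at this
-- type) and merge the sub-result with `required_keys[k] = required_keys[k].union(v)`.
def find_required_keys_list (task : String) (field : List (List (String × String))) : PySem.Dict String (PySem.Set String) :=
  field.foldl (fun req i =>
    (find_required_keys_dict task (PySem.Dict.ofList i)).items.foldl
      (fun req kv => req.modify kv.1 PySem.Set.empty (fun s => PySem.Set.union s kv.2)) req)
    PySem.Dict.empty

def plan_dependency_values (config : List (String × List (List (String × String)))) (task : String) : List (String × List String) :=
  let cfg := PySem.Dict.ofList config
  ((["operations", "prefilters", "parameters", "body", "json"]).foldl (fun req key =>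
    if cfg.contains key then
      (find_required_keys_list task (cfg.getD key [])).items.foldl
        (fun req kv => req.modify kv.1 PySem.Set.empty (fun s => PySem.Set.union s kv.2)) req
    else req) PySem.Dict.empty).items

-- ===== PORT B =====
def plan_dependency_values_alt (config : List (String × List (List (String × String)))) (task : String) : List (String × List String) :=
  let cfg := PySem.Dict.ofList config
  ((["operations", "prefilters", "parameters", "body", "json"]).foldl (fun req key =>
    (cfg.getD key []).foldl (fun req entry =>
      let d := PySem.Dict.ofList entry
      match d.get? "path" with
      | some path =>
          req.modify (d.getD "source" task) PySem.Set.empty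
            (fun s => PySem.Set.add s (pvPathHead path))
      | none => req) req) PySem.Dict.empty).items

-- ===== PRECONDITION & SPEC =====
def Spec_plan_dependency_values (config : List (String × List (List (String × String)))) (task : String) (out : List (String × List String)) : Prop := out = plan_dependency_values_alt config task
instance (config : List (String × List (List (String × String)))) (task : String) (out : List (String × List String)) : Decidable (Spec_plan_dependency_values config task out) := by unfold Spec_plan_dependency_values; infer_instance

-- ===== CLAIM (what is proved, stated in full; the proofs are below) =====
def Claim_equal_plan_dependency_values : Prop := ∀ (config : List (String × List (List (String × String)))) (task : String), Dom_plan_dependency_values config task → Spec_plan_dependency_values config task (plan_dependency_values config task)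

-- ===== LEMMAS AND PROOFS =====

-- B's per-entry step, the common denominator of both proofs
def pvBStep (task : String) (req : PySem.Dict String (PySem.Set String)) (entry : List (String × String)) : PySem.Dict String (PySem.Set String) :=
  match (PySem.Dict.ofList entry).get? "path" with
  | some path =>
      req.modify ((PySem.Dict.ofList entry).getD "source" task) PySem.Set.empty (fun s => PySem.Set.add s (pvPathHead path))
  | none => req

-- A's merge step: required_keys[k] = required_keys[k].union(v)
def pvMStep (req : PySem.Dict String (PySem.Set String)) (kv : String × PySem.Set String) : PySem.Dict String (PySem.Set String) :=
  req.modify kv.1 PySem.Set.empty (fun s => PySem.Set.union s kv.2)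

theorem pv_union_add (r s : PySem.Set String) (h : String) :
    PySem.Set.union r (PySem.Set.add s h) = PySem.Set.add (PySem.Set.union r s) h := by
  by_cases hm : h ∈ s
  · rw [PySem.Set.add_of_mem hm, PySem.Set.add_of_mem]
    rw [PySem.Set.union_eq_update, PySem.Set.mem_update]
    exact Or.inr hm
  · rw [PySem.Set.add_of_not_mem hm]
    simp only [PySem.Set.union_eq_update, PySem.Set.update_append, PySem.Set.update_cons,
      PySem.Set.update_nil]

theorem pv_modify_modify_self (r : PySem.Dict String (PySem.Set String)) (t : String)
    (f g : PySem.Set String → PySem.Set String) :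
    (r.modify t PySem.Set.empty f).modify t PySem.Set.empty g
      = r.modify t PySem.Set.empty (fun s => g (f s)) := by
  simp only [PySem.Dict.modify, PySem.Dict.getD_insert_self, PySem.Dict.insert_insert_self]

theorem pv_modify_modify_comm (r : PySem.Dict String (PySem.Set String)) (k t : String)
    (hne : k ≠ t) (ht : r.contains t = true)
    (f g : PySem.Set String → PySem.Set String) :
    (r.modify k PySem.Set.empty f).modify t PySem.Set.empty g
      = (r.modify t PySem.Set.empty g).modify k PySem.Set.empty f := by
  have hbkt : (k == t) = false := beq_eq_false_iff_ne.mpr hne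
  have hbtk : (t == k) = false := beq_eq_false_iff_ne.mpr hne.symm
  simp only [PySem.Dict.modify]
  rw [PySem.Dict.getD_insert_of_ne _ _ _ hne.symm, PySem.Dict.getD_insert_of_ne _ _ _ hne]
  -- goal: (r.insert k v).insert t w = (r.insert t w).insert k v
  apply PySem.Dict.ext
  have hct : (r.insert k (f (r.getD k PySem.Set.empty))).contains t = true := by
    rw [PySem.Dict.contains_insert, hbtk, ht]; rfl
  by_cases hk : r.contains k = true
  · have hck : (r.insert t (g (r.getD t PySem.Set.empty))).contains k = true := by
      rw [PySem.Dict.contains_insert, hbkt, hk]; rfl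
    rw [PySem.Dict.items_insert_of_contains _ _ hct,
        PySem.Dict.items_insert_of_contains _ _ hk,
        PySem.Dict.items_insert_of_contains _ _ hck,
        PySem.Dict.items_insert_of_contains _ _ ht,
        List.map_map, List.map_map]
    apply List.map_congr_left
    intro p _
    simp only [Function.comp_apply]
    by_cases hpk : (p.1 == k) = true
    · simp [hbkt, beq_iff_eq.mp hpk]
    · by_cases hpt : (p.1 == t) = true
      · simp [hpt, hpk, hbtk]
      · simp [hpk, hpt]
  · have hk' : r.contains k = false := by simpa using hk
    have hck : (r.insert t (g (r.getD t PySem.Set.empty))).contains k = false := by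
      rw [PySem.Dict.contains_insert, hbkt, hk']; rfl
    rw [PySem.Dict.items_insert_of_contains _ _ hct,
        PySem.Dict.items_insert_of_not_contains _ _ hk',
        PySem.Dict.items_insert_of_not_contains _ _ hck,
        PySem.Dict.items_insert_of_contains _ _ ht,
        List.map_append]
    simp [hne]

-- pulling a `modify t` out of a merge fold whose keys avoid t, provided t is already a key
theorem pv_mergeL_modify (l : List (String × PySem.Set String)) (t : String)
    (f : PySem.Set String → PySem.Set String)
    (hl : ∀ kv ∈ l, kv.1 ≠ t) :
    ∀ r : PySem.Dict String (PySem.Set String), r.contains t = true →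
      (l.foldl pvMStep r).modify t PySem.Set.empty f
        = l.foldl pvMStep (r.modify t PySem.Set.empty f) := by
  induction l with
  | nil => intro r _; rfl
  | cons kv rest ih =>
      intro r hr
      have hk : kv.1 ≠ t := hl kv (List.mem_cons_self)
      have hrest : ∀ p ∈ rest, p.1 ≠ t := fun p hp => hl p (List.mem_cons_of_mem _ hp)
      simp only [List.foldl_cons]
      rw [ih hrest _ (by
        show (pvMStep r kv).contains t = true
        unfold pvMStep
        rw [PySem.Dict.contains_modify]
        simp [hr]),
        show pvMStep (r.modify t PySem.Set.empty f) kv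
            = (pvMStep r kv).modify t PySem.Set.empty f from by
          unfold pvMStep
          exact (pv_modify_modify_comm r kv.1 t hk hr _ _).symm]

-- the crux: merging (fold-from-empty then union-merge) commutes with folding directly
theorem pv_merge_bstep (d : PySem.Dict String (PySem.Set String)) (hnd : d.keys.Nodup)
    (req : PySem.Dict String (PySem.Set String)) (T h : String) :
    (d.modify T PySem.Set.empty (fun s => PySem.Set.add s h)).items.foldl pvMStep req
      = (d.items.foldl pvMStep req).modify T PySem.Set.empty (fun s => PySem.Set.add s h) := by
  by_cases hc : d.contains T = true
  · -- T already a key of d: d.items = pre ++ (T, s0) :: suf with no other T key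
    have hsome : (d.get? T).isSome := by rw [← PySem.Dict.contains_eq_isSome_get?, hc]
    obtain ⟨s0, hg⟩ := Option.isSome_iff_exists.mp hsome
    obtain ⟨pre, suf, hsplit⟩ := List.append_of_mem (PySem.Dict.mem_items_of_get?_eq_some d hg)
    have hnd' : (pre.map Prod.fst ++ T :: suf.map Prod.fst).Nodup := by
      have hkeys : d.keys = d.items.map Prod.fst := rfl
      rw [hkeys, hsplit] at hnd
      simpa using hnd
    have hTsuf : ∀ kv ∈ suf, kv.1 ≠ T := by
      intro kv hkv he
      have hm : kv.1 ∈ suf.map Prod.fst := List.mem_map_of_mem hkv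
      rw [he] at hm
      exact (List.nodup_cons.mp (List.nodup_append.mp hnd').2.1).1 hm
    have hTpre : ∀ kv ∈ pre, kv.1 ≠ T := by
      intro kv hkv he
      have hm : kv.1 ∈ pre.map Prod.fst := List.mem_map_of_mem hkv
      rw [he] at hm
      exact (List.nodup_append.mp hnd').2.2 T hm T List.mem_cons_self rfl
    have hmap : (pre ++ (T, s0) :: suf).map
        (fun p => if (p.1 == T) = true then (T, PySem.Set.add s0 h) else p)
        = pre ++ (T, PySem.Set.add s0 h) :: suf := by
      rw [List.map_append, List.map_cons]
      congr 1
      · calc pre.map (fun p => if (p.1 == T) = true then (T, PySem.Set.add s0 h) else p)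
            = pre.map id := List.map_congr_left (fun p hp => by
              simp [beq_eq_false_iff_ne.mpr (hTpre p hp)])
          _ = pre := List.map_id pre
      · congr 1
        · simp
        · calc suf.map (fun p => if (p.1 == T) = true then (T, PySem.Set.add s0 h) else p)
              = suf.map id := List.map_congr_left (fun p hp => by
                simp [beq_eq_false_iff_ne.mpr (hTsuf p hp)])
            _ = suf := List.map_id suf
    rw [PySem.Dict.modify, PySem.Dict.getD_of_get?_eq_some _ _ hg,
        PySem.Dict.items_insert_of_contains _ _ hc, hsplit, hmap,
        List.foldl_append, List.foldl_cons, List.foldl_append, List.foldl_cons]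
    have hcon : (pvMStep (pre.foldl pvMStep req) (T, s0)).contains T = true := by
      unfold pvMStep
      rw [PySem.Dict.contains_modify]
      simp
    rw [pv_mergeL_modify suf T _ hTsuf _ hcon]
    congr 1
    unfold pvMStep
    rw [pv_modify_modify_self]
    congr 1
    funext s
    exact pv_union_add s s0 h
  · have hc' : d.contains T = false := by simpa using hc
    rw [PySem.Dict.modify, PySem.Dict.getD_of_not_contains d PySem.Set.empty hc',
        PySem.Dict.items_insert_of_not_contains _ _ hc', List.foldl_append]
    rfl

theorem pv_merge_fold (task : String) (field : List (List (String × String))) :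
    ∀ (d req : PySem.Dict String (PySem.Set String)), d.keys.Nodup →
      (field.foldl (pvBStep task) d).items.foldl pvMStep req
        = field.foldl (pvBStep task) (d.items.foldl pvMStep req) := by
  induction field with
  | nil => intro d req _; rfl
  | cons entry rest ih =>
      intro d req hnd
      simp only [List.foldl_cons]
      have hstep : (pvBStep task d entry).keys.Nodup := by
        unfold pvBStep
        split
        · simp only [PySem.Dict.modify]
          exact PySem.Dict.nodup_keys_insert _ _ _ hnd
        · exact hnd
      rw [ih _ _ hstep]
      congr 1
      unfold pvBStep
      split
      · exact pv_merge_bstep d hnd req _ _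
      · rfl

-- a fold whose step only acts on 'path' keys does nothing on a list without one
theorem pv_foldl_path_none (F : PySem.Dict String (PySem.Set String) → String → PySem.Dict String (PySem.Set String)) :
    ∀ (l : List (String × String)) (r : PySem.Dict String (PySem.Set String)),
      (∀ kv ∈ l, (kv.1 == "path") = false) →
      l.foldl (fun req kv => if (kv.1 == "path") = true then F req kv.2 else req) r = r := by
  intro l
  induction l with
  | nil => intro r _; rfl
  | cons kv rest ih =>
      intro r hl
      simp only [List.foldl_cons, hl kv List.mem_cons_self, Bool.false_eq_true]
      exact ih r (fun p hp => hl p (List.mem_cons_of_mem _ hp))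

-- the fold of A's dict case hits the (unique) 'path' entry at most once
theorem pv_foldl_path_char (F : PySem.Dict String (PySem.Set String) → String → PySem.Dict String (PySem.Set String))
    (l : List (String × String)) (hl : (l.map Prod.fst).Nodup) :
    l.foldl (fun req kv => if (kv.1 == "path") = true then F req kv.2 else req) PySem.Dict.empty
      = match l.find? (fun p => p.1 == "path") with
        | some p => F PySem.Dict.empty p.2
        | none => PySem.Dict.empty := by
  induction l with
  | nil => rfl
  | cons kv rest ih =>
      by_cases hk : (kv.1 == "path") = true
      · have hf : List.find? (fun p => p.1 == "path") (kv :: rest) = some kv :=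
          List.find?_cons_of_pos hk
        rw [hf]
        simp only [List.foldl_cons, hk, if_pos]
        apply pv_foldl_path_none
        intro p hp
        have hnp : kv.1 ∉ rest.map Prod.fst := (List.nodup_cons.mp hl).1
        rw [beq_eq_false_iff_ne]
        intro he
        exact hnp (beq_iff_eq.mp hk ▸ he ▸ List.mem_map_of_mem hp)
      · have hf : List.find? (fun p => p.1 == "path") (kv :: rest)
            = List.find? (fun p => p.1 == "path") rest :=
          List.find?_cons_of_neg (by simpa using hk)
        rw [hf]
        simp only [List.foldl_cons, hk, Bool.false_eq_true]
        exact ih (List.nodup_cons.mp hl).2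

-- merging the singleton sub-dict {T : {x}} into req is one direct modify-add
theorem pv_merge_single (T x : String) (req : PySem.Dict String (PySem.Set String)) :
    (PySem.Dict.empty.modify T PySem.Set.empty (fun s => PySem.Set.add s x)).items.foldl pvMStep req
      = req.modify T PySem.Set.empty (fun s => PySem.Set.add s x) := by
  rw [PySem.Dict.modify, PySem.Dict.items_insert_of_not_contains _ _ (by rfl)]
  rfl

-- A's per-dict merge step equals B's per-entry step
theorem pv_frk_dict_merge (task : String) (i : List (String × String)) (req : PySem.Dict String (PySem.Set String)) :
    (find_required_keys_dict task (PySem.Dict.ofList i)).items.foldl pvMStep req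
      = pvBStep task req i := by
  unfold find_required_keys_dict pvBStep
  have hnd : ((PySem.Dict.ofList i).items.map Prod.fst).Nodup := PySem.Dict.nodup_keys_ofList i
  rw [pv_foldl_path_char (fun req v =>
    if (PySem.Dict.ofList i).contains "source" = true then
      req.modify ((PySem.Dict.ofList i).getD "source" "") PySem.Set.empty
        (fun s => PySem.Set.add s (pvPathHead v))
    else
      req.modify task PySem.Set.empty (fun s => PySem.Set.add s (pvPathHead v)))
    _ hnd]
  have hg : (PySem.Dict.ofList i).get? "path"
      = ((PySem.Dict.ofList i).items.find? (fun p => p.1 == "path")).map (fun x => x.2) := rfl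
  cases hf : (PySem.Dict.ofList i).items.find? (fun p => p.1 == "path") with
  | none => rw [hg, hf]; rfl
  | some p =>
      rw [hg, hf]
      simp only [Option.map_some]
      by_cases hs : (PySem.Dict.ofList i).contains "source" = true
      · have hsome : ((PySem.Dict.ofList i).get? "source").isSome := by
          rw [← PySem.Dict.contains_eq_isSome_get?, hs]
        obtain ⟨sv, hsv⟩ := Option.isSome_iff_exists.mp hsome
        rw [if_pos hs, PySem.Dict.getD_of_get?_eq_some _ _ hsv,
            PySem.Dict.getD_of_get?_eq_some _ _ hsv]
        exact pv_merge_single _ _ req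
      · have hs' : (PySem.Dict.ofList i).contains "source" = false := by simpa using hs
        rw [if_neg hs, PySem.Dict.getD_of_not_contains _ task hs']
        exact pv_merge_single _ _ req

theorem pv_frk_list (task : String) (field : List (List (String × String))) :
    find_required_keys_list task field = field.foldl (pvBStep task) PySem.Dict.empty := by
  suffices h : ∀ (l : List (List (String × String))) (d : PySem.Dict String (PySem.Set String)),
      l.foldl (fun req i =>
        (find_required_keys_dict task (PySem.Dict.ofList i)).items.foldl pvMStep req) d
        = l.foldl (pvBStep task) d from h field PySem.Dict.empty
  intro l
  induction l with
  | nil => intro d; rfl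
  | cons i rest ih =>
      intro d
      simp only [List.foldl_cons]
      rw [pv_frk_dict_merge]
      exact ih _

theorem plan_dependency_values_spec : Claim_equal_plan_dependency_values := by
  intro config task _
  have h : ∀ (ks : List String) (req : PySem.Dict String (PySem.Set String)),
      ks.foldl (fun req key =>
        if (PySem.Dict.ofList config).contains key = true then
          (find_required_keys_list task ((PySem.Dict.ofList config).getD key [])).items.foldl
            pvMStep req
        else req) req
      = ks.foldl (fun req key =>
          ((PySem.Dict.ofList config).getD key []).foldl (pvBStep task) req) req := by
    intro ks
    induction ks with
    | nil => intro req; rfl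
    | cons key rest ih =>
        intro req
        simp only [List.foldl_cons]
        rw [show (if (PySem.Dict.ofList config).contains key = true then
            (find_required_keys_list task ((PySem.Dict.ofList config).getD key [])).items.foldl
              pvMStep req
          else req)
          = ((PySem.Dict.ofList config).getD key []).foldl (pvBStep task) req from ?_]
        · exact ih _
        · by_cases hk : (PySem.Dict.ofList config).contains key = true
          · rw [if_pos hk, pv_frk_list,
              pv_merge_fold task _ PySem.Dict.empty req PySem.Dict.nodup_keys_empty]
            rfl
          · have hk' : (PySem.Dict.ofList config).contains key = false := by simpa using hk
            rw [if_neg hk, PySem.Dict.getD_of_not_contains _ [] hk']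
            rfl
  exact congrArg PySem.Dict.items
    (h ["operations", "prefilters", "parameters", "body", "json"] PySem.Dict.empty)
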